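-- pv_equiv track=rewrite | github.com/asivokon/ua-gec | scripts/m2_to_annotated.py | token_to_character_position
-- ===== SOURCE A (Python) =====
-- def token_to_character_position(s: str, token_pos: int) -> int:
--     char_pos = 0
--     while token_pos:
--         token_pos -= 1
--         char_pos = s.find(" ", char_pos) + 1
--         if char_pos == 0:
--             if token_pos > 0:
--                 raise IndexError(f"Token is outside of the string")
--             else:
--                 char_pos = len(s)
--     return char_pos
-- ===== SOURCE B (Python) =====
-- def token_to_character_position(s: str, token_pos: int) -> int:
--     # One pass: table of token start positions (plus end-of-string slot), then a lookup.
--     positions = [0] + [i + 1 for i, c in enumerate(s) if c == " "] + [len(s)]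
--     if 0 <= token_pos < len(positions):
--         return positions[token_pos]
--     raise IndexError("Token is outside of the string")
-- ===== Notes on version B (the rewrite author's own statement) =====
-- stated objective: simpler
-- what changed: Replaces the repeated str.find loop that advances a cursor token_pos times by a single enumerate pass building the table of token start positions (with len(s) as the end slot) followed by one bounds-checked lookup.
import Mathlib
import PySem

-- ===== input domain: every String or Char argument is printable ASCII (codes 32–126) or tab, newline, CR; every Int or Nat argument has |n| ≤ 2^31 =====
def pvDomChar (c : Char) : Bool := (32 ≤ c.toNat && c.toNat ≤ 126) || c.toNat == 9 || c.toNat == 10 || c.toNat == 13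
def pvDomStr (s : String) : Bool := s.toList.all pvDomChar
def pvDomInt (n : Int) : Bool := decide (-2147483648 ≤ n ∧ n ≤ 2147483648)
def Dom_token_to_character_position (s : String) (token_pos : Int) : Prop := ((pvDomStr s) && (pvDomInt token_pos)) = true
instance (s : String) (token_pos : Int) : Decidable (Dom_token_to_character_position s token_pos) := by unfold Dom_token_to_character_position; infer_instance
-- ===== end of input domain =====

-- B replaces A's cursor-advancing find loop by one pass building the table of token
-- start positions plus a single bounds-checked lookup (objective: simpler).

-- ===== PORT A =====
-- the while loop, one step per decrement of token_pos (fuel = the loop counter)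
def tokGoA (cs : List Char) : Nat → Int → Int
  | 0, char_pos => char_pos
  | Nat.succ k, char_pos =>
    let cp := PySem.Chars.findFrom cs [' '] char_pos none + 1
    if cp = 0 then
      if (k : Int) > 0 then 0  -- 'raise IndexError' — excluded by Pre_
      else tokGoA cs k (cs.length : Int)
    else tokGoA cs k cp

def token_to_character_position (s : String) (token_pos : Int) : Int :=
  tokGoA s.toList token_pos.toNat 0
  -- for token_pos < 0 the Python while loop never terminates — excluded by Pre_

-- ===== PORT B =====
def token_to_character_position_alt (s : String) (token_pos : Int) : Int :=
  let cs := s.toList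
  let positions : List Int :=
    0 :: ((PySem.List.enumerate cs 0).filter (fun p => p.2 == ' ')).map (fun p => p.1 + 1)
      ++ [(cs.length : Int)]
  if 0 ≤ token_pos ∧ token_pos < (positions.length : Int) then
    (PySem.List.pyGet? positions token_pos).getD 0  -- in range: always some
  else 0  -- 'raise IndexError' — excluded by Pre_

-- ===== PRECONDITION & SPEC =====
-- Pre_ excludes exactly the inputs on which the Python A returns no value: negative
-- token_pos (the while loop never terminates) and token_pos > count(' ')+1 (IndexError).
def Pre_token_to_character_position (s : String) (token_pos : Int) : Prop :=
  0 ≤ token_pos ∧ token_pos ≤ (s.toList.count ' ' : Int) + 1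
instance (s : String) (token_pos : Int) : Decidable (Pre_token_to_character_position s token_pos) := by unfold Pre_token_to_character_position; infer_instance

def pvWitness_token_to_character_position : String × Int := ("ab cd e", 2)

def Spec_token_to_character_position (s : String) (token_pos : Int) (out : Int) : Prop := out = token_to_character_position_alt s token_pos
instance (s : String) (token_pos : Int) (out : Int) : Decidable (Spec_token_to_character_position s token_pos out) := by unfold Spec_token_to_character_position; infer_instance

-- ===== CLAIM (what is proved, stated in full; the proofs are below) =====
def Claim_equal_token_to_character_position : Prop := ∀ (s : String) (token_pos : Int), Dom_token_to_character_position s token_pos → Pre_token_to_character_position s token_pos → Spec_token_to_character_position s token_pos (token_to_character_position s token_pos)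

-- ===== LEMMAS AND PROOFS =====

-- the list of indices of ' ' in cs, in increasing order (what B's table is built from)
def spIdx (cs : List Char) : List Int :=
  ((PySem.List.enumerate cs 0).filter (fun p => p.2 == ' ')).map (fun p => p.1)

-- start position of the j-th token (j = 0 .. (spIdx cs).length + 1; the last slot is len)
def posN (cs : List Char) (j : Nat) : Nat :=
  if j = 0 then 0
  else if h : j - 1 < (spIdx cs).length then ((spIdx cs)[j-1]).toNat + 1
  else cs.length

lemma mem_spIdx {cs : List Char} {x : Int} :
    x ∈ spIdx cs ↔ ∃ (i : Nat), ∃ h : i < cs.length, x = (i : Int) ∧ cs[i] = ' ' := by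
  unfold spIdx
  simp [List.mem_map, List.mem_filter, PySem.List.mem_enumerate_iff]

lemma spIdx_pairwise (cs : List Char) : (spIdx cs).Pairwise (· < ·) := by
  unfold spIdx
  exact ((PySem.List.pairwise_lt_enumerate cs 0).filter _).map _ (fun a b h => h)

lemma spIdx_length (cs : List Char) : (spIdx cs).length = cs.count ' ' := by
  unfold spIdx
  rw [List.length_map, ← PySem.List.map_snd_enumerate cs 0, List.count, List.countP_map]
  simp [List.countP_eq_length_filter, Function.comp_def]

lemma spIdx_bounds {cs : List Char} {x : Int} (hx : x ∈ spIdx cs) :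
    0 ≤ x ∧ x < (cs.length : Int) := by
  obtain ⟨i, h, rfl, _⟩ := mem_spIdx.mp hx
  constructor <;> omega

lemma posN_le (cs : List Char) (j : Nat) : posN cs j ≤ cs.length := by
  unfold posN
  split
  · omega
  · split
    · next h =>
      have := spIdx_bounds (cs := cs) (List.getElem_mem h)
      omega
    · omega

lemma single_prefix {a : Char} {l : List Char} : [a] <+: l ↔ l.head? = some a := by
  cases l with
  | nil => simp
  | cons b t => simp [List.cons_prefix_cons, eq_comm]

lemma space_iff (cs : List Char) (c k : Nat) :
    [' '] <+: (cs.drop c).drop k ↔ cs[c+k]? = some ' ' := by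
  rw [List.drop_drop, single_prefix, List.head?_drop, Nat.add_comm]

lemma find_at (cs : List Char) (c : Nat) (hc : c ≤ cs.length) (t : Int) (ht : t ∈ spIdx cs)
    (hct : (c : Int) ≤ t) (hmin : ∀ u ∈ spIdx cs, (c : Int) ≤ u → t ≤ u) :
    PySem.Chars.findFrom cs [' '] (c : Int) none = t := by
  obtain ⟨i, hi, rfl, hsp⟩ := mem_spIdx.mp ht
  rw [PySem.Chars.findFrom_natCast cs [' '] c hc]
  have hocc : [' '] <+: (cs.drop c).drop (i - c) := by
    rw [space_iff]
    have : c + (i - c) = i := by omega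
    rw [this, List.getElem?_eq_some_iff]
    exact ⟨hi, hsp⟩
  have hinf : [' '] <:+: cs.drop c := by
    rw [← PySem.Chars.isIn_iff_infix, ← PySem.Chars.exists_prefix_drop_iff_isIn]
    exact ⟨_, hocc⟩
  have hne : PySem.Chars.find (cs.drop c) [' '] ≠ -1 :=
    fun h => (PySem.Chars.find_eq_neg_one_iff _ _).mp h hinf
  have hnn : 0 ≤ PySem.Chars.find (cs.drop c) [' '] := (PySem.Chars.find_nonneg_iff _ _).mpr hinf
  obtain ⟨hpre, hlt⟩ := PySem.Chars.find_spec (s := cs.drop c) (sub := [' ']) hnn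
  set f := PySem.Chars.find (cs.drop c) [' '] with hf
  have hs2 : cs[c + f.toNat]? = some ' ' := (space_iff cs c f.toNat).mp hpre
  have hmem2 : ((c + f.toNat : Nat) : Int) ∈ spIdx cs := by
    rw [mem_spIdx]
    obtain ⟨h1, h2⟩ := List.getElem?_eq_some_iff.mp hs2
    exact ⟨c + f.toNat, h1, rfl, h2⟩
  have h1 : (i : Int) ≤ ((c + f.toNat : Nat) : Int) := hmin _ hmem2 (by push_cast; omega)
  have h2 : f.toNat ≤ i - c := by
    by_contra hcon
    exact hlt (i - c) (by omega) hocc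
  have : c + f.toNat = i := by omega
  simp only [if_neg hne]
  omega

lemma find_none (cs : List Char) (c : Nat) (hc : c ≤ cs.length)
    (hno : ∀ u ∈ spIdx cs, u < (c : Int)) :
    PySem.Chars.findFrom cs [' '] (c : Int) none = -1 := by
  rw [PySem.Chars.findFrom_natCast_eq_neg_one_iff cs [' '] c hc]
  intro hinf
  rw [← PySem.Chars.isIn_iff_infix, ← PySem.Chars.exists_prefix_drop_iff_isIn] at hinf
  obtain ⟨j, hj⟩ := hinf
  have hs2 : cs[c + j]? = some ' ' := (space_iff cs c j).mp hj
  have hmem2 : ((c + j : Nat) : Int) ∈ spIdx cs := by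
    rw [mem_spIdx]
    obtain ⟨h1, h2⟩ := List.getElem?_eq_some_iff.mp hs2
    exact ⟨c + j, h1, rfl, h2⟩
  have := hno _ hmem2
  omega

lemma getElem_le_getElem_spIdx (cs : List Char) {m j : Nat} (hm : m < (spIdx cs).length)
    (hj : j < (spIdx cs).length) (hmj : m ≤ j) : (spIdx cs)[m] ≤ (spIdx cs)[j] := by
  rcases Nat.lt_or_ge m j with h | h
  · exact le_of_lt (List.pairwise_iff_getElem.mp (spIdx_pairwise cs) m j hm hj h)
  · have : m = j := by omega
    subst this; exact le_refl _

lemma find_at_pos (cs : List Char) (j : Nat) (hj : j < (spIdx cs).length) :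
    PySem.Chars.findFrom cs [' '] ((posN cs j : Nat) : Int) none = (spIdx cs)[j] := by
  have hct : ((posN cs j : Nat) : Int) ≤ (spIdx cs)[j] := by
    unfold posN
    rcases Nat.eq_zero_or_pos j with h0 | hpos
    · subst h0
      simpa using (spIdx_bounds (List.getElem_mem hj)).1
    · have hj1 : j - 1 < (spIdx cs).length := by omega
      simp only [if_neg (by omega : ¬ j = 0), dif_pos hj1]
      have hnn := (spIdx_bounds (List.getElem_mem hj1)).1
      have hlt := List.pairwise_iff_getElem.mp (spIdx_pairwise cs) (j-1) j hj1 hj (by omega)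
      push_cast
      omega
  have hmin : ∀ u ∈ spIdx cs, ((posN cs j : Nat) : Int) ≤ u → (spIdx cs)[j] ≤ u := by
    intro u hu hcu
    obtain ⟨m, hm, rfl⟩ := List.mem_iff_getElem.mp hu
    by_contra hcon
    push Not at hcon
    have hmj : m < j := by
      by_contra hge
      push Not at hge
      exact absurd (getElem_le_getElem_spIdx cs hj hm hge) (by omega)
    have hj1 : j - 1 < (spIdx cs).length := by omega
    have h1 : (spIdx cs)[m] ≤ (spIdx cs)[j-1] := getElem_le_getElem_spIdx cs hm hj1 (by omega)
    have hnn := (spIdx_bounds (List.getElem_mem hj1)).1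
    unfold posN at hcu
    simp only [if_neg (by omega : ¬ j = 0), dif_pos hj1] at hcu
    push_cast at hcu
    omega
  exact find_at cs (posN cs j) (posN_le cs j) _ (List.getElem_mem hj) hct hmin

lemma find_at_end (cs : List Char) :
    PySem.Chars.findFrom cs [' '] ((posN cs ((spIdx cs).length) : Nat) : Int) none = -1 := by
  apply find_none cs _ (posN_le cs _)
  intro u hu
  obtain ⟨m, hm, rfl⟩ := List.mem_iff_getElem.mp hu
  have hn : ¬ (spIdx cs).length = 0 := by omega
  have hj1 : (spIdx cs).length - 1 < (spIdx cs).length := by omega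
  have h1 : (spIdx cs)[m] ≤ (spIdx cs)[(spIdx cs).length - 1] :=
    getElem_le_getElem_spIdx cs hm hj1 (by omega)
  have hnn := (spIdx_bounds (List.getElem_mem hj1)).1
  unfold posN
  simp only [if_neg hn, dif_pos hj1]
  push_cast
  omega

lemma posN_succ_of_lt (cs : List Char) (j : Nat) (hj : j < (spIdx cs).length) :
    ((posN cs (j+1) : Nat) : Int) = (spIdx cs)[j] + 1 := by
  have hnn := (spIdx_bounds (List.getElem_mem hj)).1
  unfold posN
  simp only [if_neg (by omega : ¬ j + 1 = 0), Nat.add_sub_cancel, dif_pos hj]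
  push_cast
  omega

lemma tokGoA_pos (cs : List Char) (k j : Nat) (h : j + k ≤ (spIdx cs).length + 1) :
    tokGoA cs k ((posN cs j : Nat) : Int) = ((posN cs (j + k) : Nat) : Int) := by
  induction k generalizing j with
  | zero => rfl
  | succ k ih =>
    by_cases hj : j < (spIdx cs).length
    · have hnn := (spIdx_bounds (List.getElem_mem hj)).1
      simp only [tokGoA, find_at_pos cs j hj]
      rw [if_neg (by omega : ¬ (spIdx cs)[j] + 1 = 0)]
      rw [← posN_succ_of_lt cs j hj]
      have harith : j + 1 + k = j + (k + 1) := by omega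
      rw [← harith]
      exact ih (j+1) (by omega)
    · have hje : j = (spIdx cs).length := by omega
      have hke : k = 0 := by omega
      subst hje hke
      simp only [tokGoA, find_at_end cs]
      norm_num
      unfold posN
      rcases Nat.eq_zero_or_pos ((spIdx cs).length + 1) with h0 | _
      · omega
      · simp only [if_neg (by omega : ¬ (spIdx cs).length + 1 = 0),
          dif_neg (by omega : ¬ (spIdx cs).length + 1 - 1 < (spIdx cs).length)]

lemma alt_eq_pos (s : String) (token_pos : Int)
    (h : Pre_token_to_character_position s token_pos) :
    token_to_character_position_alt s token_pos = ((posN s.toList token_pos.toNat : Nat) : Int) := by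
  obtain ⟨h0, h1⟩ := h
  unfold token_to_character_position_alt
  have hmap : ((PySem.List.enumerate s.toList 0).filter (fun p => p.2 == ' ')).map (fun p => p.1 + 1)
      = (spIdx s.toList).map (· + 1) := by
    unfold spIdx
    rw [List.map_map]
    rfl
  dsimp only
  rw [hmap]
  have hk : token_pos = ((token_pos.toNat : Nat) : Int) := by omega
  have hkn : token_pos.toNat ≤ (spIdx s.toList).length + 1 := by
    rw [spIdx_length]; omega
  set cs := s.toList with hcs
  set n := (spIdx cs).length with hn
  -- note '0 :: M ++ [L]' parses as '(0 :: M) ++ [L]'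
  have hlen : ((0 : Int) :: List.map (fun x => x + 1) (spIdx cs) ++ [(cs.length : Int)]).length = n + 2 := by
    simp [hn]
  rw [if_pos (⟨h0, by rw [hlen]; push_cast; omega⟩ :
      0 ≤ token_pos ∧ token_pos < (((0 : Int) :: List.map (fun x => x + 1) (spIdx cs) ++ [(cs.length : Int)]).length : Int))]
  rw [hk, PySem.List.pyGet?_natCast]
  have hklt : token_pos.toNat < ((0 : Int) :: List.map (fun x => x + 1) (spIdx cs) ++ [(cs.length : Int)]).length := by
    rw [hlen]; omega
  rw [List.getElem?_eq_getElem hklt, Option.getD_some]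
  simp only [Int.toNat_natCast]
  by_cases hm : token_pos.toNat < n + 1
  · rw [List.getElem_append_left (by simpa using hm)]
    have hgen : ∀ m, ∀ hm' : m < ((0 : Int) :: List.map (fun x => x + 1) (spIdx cs)).length,
        ((0 : Int) :: List.map (fun x => x + 1) (spIdx cs))[m]'hm' = ((posN cs m : Nat) : Int) := by
      intro m hm'
      match m with
      | 0 => simp [posN]
      | Nat.succ m' =>
        rw [List.getElem_cons_succ, List.getElem_map]
        exact (posN_succ_of_lt cs m' (by simpa using hm')).symm
    exact hgen _ _
  · have hmn : token_pos.toNat = n + 1 := by omega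
    rw [List.getElem_append_right (by simp; omega)]
    rw [List.getElem_singleton]
    unfold posN
    rw [if_neg (by omega : ¬ token_pos.toNat = 0),
      dif_neg (by omega : ¬ token_pos.toNat - 1 < (spIdx cs).length)]

-- ===== VERDICT (by name: the statement is the Claim_ definition above) =====
theorem token_to_character_position_spec : Claim_equal_token_to_character_position := by
  intro s token_pos _hD hPre
  unfold Spec_token_to_character_position token_to_character_position
  rw [alt_eq_pos s token_pos hPre]
  have h0 : ((posN s.toList 0 : Nat) : Int) = 0 := by simp [posN]
  have hk : token_pos.toNat ≤ (spIdx s.toList).length + 1 := by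
    have := hPre.2
    rw [spIdx_length]
    omega
  have := tokGoA_pos s.toList token_pos.toNat 0 (by simpa using hk)
  simpa [h0] using this
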